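-- pv_equiv track=rewrite | github.com/BrenoSPXx/Projeto_POO | funcoes.py | funcionarios_disponiveis
-- ===== SOURCE A (Python) =====
-- def funcionarios_disponiveis(funcionarios_em_atividade, ids_em_uso):
--     cont_cobrador_disponivel = 0  #quantidade de cobrador disponível
--     cont_motorista_disponivel = 0 #quantidade de motorista disponível
--     for funcionario in ids_em_uso:    #verifica se há funcionários suficientes para operar um ônibus, analisando os que não estão em atividade
--         if funcionario not in funcionarios_em_atividade:
--             if len(funcionario) == 4:
--                 cont_cobrador_disponivel += 1
--             else:
--                 cont_motorista_disponivel += 1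
--
--     if cont_cobrador_disponivel > 0 and cont_motorista_disponivel > 0: #se há um ou mais motoristas e um ou mais cobradores, então há funcionários suficientes
--         return True
--     else:
--         return False
-- ===== SOURCE B (Python) =====
-- def funcionarios_disponiveis(funcionarios_em_atividade, ids_em_uso):
--     # Split the ids by role FIRST (cobrador = id of length 4, motorista = the rest),
--     # then search each group for one worker not currently active, stopping early.
--     def algum_livre(grupo):
--         for f in grupo:
--             if f not in funcionarios_em_atividade:
--                 return True
--         return False
--
--     cobradores = [f for f in ids_em_uso if len(f) == 4]
--     motoristas = [f for f in ids_em_uso if len(f) != 4]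
--     return algum_livre(cobradores) and algum_livre(motoristas)
-- ===== Notes on version B (the rewrite author's own statement) =====
-- stated objective: alternative
-- what changed: Inverts the staging: instead of one availability-first pass accumulating two role counters and a final AND, B partitions the ids by role first and then answers availability per group with a short-circuiting early-return search.
import Mathlib
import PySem

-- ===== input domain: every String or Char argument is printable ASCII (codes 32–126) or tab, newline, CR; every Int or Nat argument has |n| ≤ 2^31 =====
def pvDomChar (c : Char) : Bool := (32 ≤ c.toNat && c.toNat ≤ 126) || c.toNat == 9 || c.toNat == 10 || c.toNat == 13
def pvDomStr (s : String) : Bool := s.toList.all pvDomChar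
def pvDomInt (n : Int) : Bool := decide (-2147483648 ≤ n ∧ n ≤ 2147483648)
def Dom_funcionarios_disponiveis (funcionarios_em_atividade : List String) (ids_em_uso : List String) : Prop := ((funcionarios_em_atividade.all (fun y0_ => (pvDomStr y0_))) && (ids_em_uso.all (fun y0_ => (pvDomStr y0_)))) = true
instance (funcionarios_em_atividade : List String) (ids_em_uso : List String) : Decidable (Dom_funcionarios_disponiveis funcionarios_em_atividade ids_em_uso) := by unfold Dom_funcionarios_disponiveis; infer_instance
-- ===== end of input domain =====

-- B partitions the ids by role first and searches each group, short-circuiting, for an available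
-- worker, instead of A's single availability-first pass with two counters; objective: alternative.

-- ===== PORT A =====
-- A's loop: fold over ids_em_uso carrying the two counters (cobrador, motorista).
def funcionarios_disponiveis (funcionarios_em_atividade : List String) (ids_em_uso : List String) : Bool :=
  let counts := ids_em_uso.foldl (fun (st : Int × Int) funcionario =>
    if funcionario ∉ funcionarios_em_atividade then
      if (PySem.Str.len funcionario) = 4 then (st.1 + 1, st.2) else (st.1, st.2 + 1)
    else st) (0, 0)
  if counts.1 > 0 ∧ counts.2 > 0 then true else false

-- ===== PORT B =====
-- B's algum_livre (early-return loop) as the obvious structural recursion: short-circuits on the first available member.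
def pvAlgumLivre (funcionarios_em_atividade : List String) : List String → Bool
  | [] => false
  | f :: resto => (f ∉ funcionarios_em_atividade) || pvAlgumLivre funcionarios_em_atividade resto

def funcionarios_disponiveis_alt (funcionarios_em_atividade : List String) (ids_em_uso : List String) : Bool :=
  let cobradores := ids_em_uso.filter (fun f => (PySem.Str.len f) = 4)
  let motoristas := ids_em_uso.filter (fun f => (PySem.Str.len f) ≠ 4)
  pvAlgumLivre funcionarios_em_atividade cobradores && pvAlgumLivre funcionarios_em_atividade motoristas

-- ===== PRECONDITION & SPEC =====
def Spec_funcionarios_disponiveis (funcionarios_em_atividade : List String) (ids_em_uso : List String) (out : Bool) : Prop := out = funcionarios_disponiveis_alt funcionarios_em_atividade ids_em_uso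
instance (funcionarios_em_atividade : List String) (ids_em_uso : List String) (out : Bool) : Decidable (Spec_funcionarios_disponiveis funcionarios_em_atividade ids_em_uso out) := by unfold Spec_funcionarios_disponiveis; infer_instance

-- ===== CLAIM (what is proved, stated in full; the proofs are below) =====
def Claim_equal_funcionarios_disponiveis : Prop := ∀ (funcionarios_em_atividade : List String) (ids_em_uso : List String), Dom_funcionarios_disponiveis funcionarios_em_atividade ids_em_uso → Spec_funcionarios_disponiveis funcionarios_em_atividade ids_em_uso (funcionarios_disponiveis funcionarios_em_atividade ids_em_uso)

-- ===== LEMMAS AND PROOFS =====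

-- A's fold: the counters are the initial counters plus the number of available ids of each role.
theorem pv_fold_counts (fa : List String) (ids : List String) (c m : Int) :
    ids.foldl (fun (st : Int × Int) funcionario =>
      if funcionario ∉ fa then
        if (PySem.Str.len funcionario) = 4 then (st.1 + 1, st.2) else (st.1, st.2 + 1)
      else st) (c, m)
    = (c + ((ids.filter (fun f => f ∉ fa)).countP (fun f => decide ((PySem.Str.len f) = 4))),
       m + ((ids.filter (fun f => f ∉ fa)).countP (fun f => decide ((PySem.Str.len f) ≠ 4)))) := by
  induction ids generalizing c m with
  | nil => simp
  | cons x xs ih =>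
    rw [List.foldl_cons, List.filter_cons]
    by_cases hx : x ∈ fa
    · rw [if_neg (by simp [hx]), if_neg (by simp [hx]), ih]
    · have hfx : decide (x ∉ fa) = true := by simp [hx]
      rw [if_pos hx, if_pos hfx, List.countP_cons, List.countP_cons]
      by_cases h4 : (PySem.Str.len x) = 4
      · rw [if_pos h4, ih]
        simp only [PySem.Str.len, String.length_toList] at h4
        refine Prod.ext ?_ ?_ <;> simp [h4] <;> ring
      · rw [if_neg h4, ih]
        simp only [PySem.Str.len, String.length_toList] at h4
        refine Prod.ext ?_ ?_ <;> simp [h4] <;> ring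

-- B's recursive search is the existence of an available member.
theorem pv_algumLivre_eq_any (fa : List String) (l : List String) :
    pvAlgumLivre fa l = l.any (fun f => decide (f ∉ fa)) := by
  induction l with
  | nil => rfl
  | cons x xs ih => simp [pvAlgumLivre, ih]

-- Counting inside the availability filter is positive iff the role-filtered list has an available member.
theorem pv_count_pos_iff (fa : List String) (ids : List String) (p : String → Bool) :
    (0 < (((ids.filter (fun f => f ∉ fa)).countP p : Nat) : Int)) ↔
      ((ids.filter p).any (fun f => decide (f ∉ fa)) = true) := by
  rw [Int.natCast_pos, Nat.pos_iff_ne_zero, ne_eq, List.countP_eq_zero, List.any_eq_true]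
  constructor
  · intro h
    push_neg at h
    obtain ⟨f, hf, hp⟩ := h
    rw [List.mem_filter] at hf
    exact ⟨f, List.mem_filter.mpr ⟨hf.1, hp⟩, by simpa using hf.2⟩
  · intro ⟨f, hf, hfa⟩ h
    rw [List.mem_filter] at hf
    exact absurd (h f (List.mem_filter.mpr ⟨hf.1, by simpa using hfa⟩)) (by simp [hf.2])

-- ===== VERDICT (by name: the statement is the Claim_ definition above) =====
theorem funcionarios_disponiveis_spec : Claim_equal_funcionarios_disponiveis := by
  intro fa ids _
  unfold Spec_funcionarios_disponiveis funcionarios_disponiveis funcionarios_disponiveis_alt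
  rw [pv_fold_counts]
  simp only [pv_algumLivre_eq_any]
  simp only [zero_add, gt_iff_lt]
  have e1 := pv_count_pos_iff fa ids (fun f => decide ((PySem.Str.len f) = 4))
  have e2 := pv_count_pos_iff fa ids (fun f => decide ((PySem.Str.len f) ≠ 4))
  split_ifs with h
  · rw [e1.mp h.1, e2.mp h.2]; rfl
  · rcases not_and_or.mp h with h' | h'
    · rw [Bool.eq_false_iff.mpr (fun ha => h' (e1.mpr ha)), Bool.false_and]
    · rw [Bool.eq_false_iff.mpr (fun ha => h' (e2.mpr ha)), Bool.and_false]
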